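-- pv_equiv track=rewrite | github.com/danielhuf/INF1025 | Exercicio_7.py | contAlg
-- ===== SOURCE A (Python) =====
-- def contAlg(n):
--     if n<10:
--         if n==3 or n==4:
--             return 1
--         else:
--             return 0
--     else:
--         if n%10==3 or n%10==4:
--             return 1+contAlg(n//10)
--         else:
--             return contAlg(n//10)
-- ===== SOURCE B (Python) =====
-- def contAlg(n):
--     count = 0
--     while n >= 10:
--         if n % 10 == 3 or n % 10 == 4:
--             count += 1
--         n //= 10
--     if n == 3 or n == 4:
--         count += 1
--     return count
-- ===== Notes on version B (the rewrite author's own statement) =====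
-- stated objective: alternative
-- what changed: Replaces A's non-tail recursion with an iterative while loop carrying an explicit counter accumulator and a trailing single-digit check.
import Mathlib
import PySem

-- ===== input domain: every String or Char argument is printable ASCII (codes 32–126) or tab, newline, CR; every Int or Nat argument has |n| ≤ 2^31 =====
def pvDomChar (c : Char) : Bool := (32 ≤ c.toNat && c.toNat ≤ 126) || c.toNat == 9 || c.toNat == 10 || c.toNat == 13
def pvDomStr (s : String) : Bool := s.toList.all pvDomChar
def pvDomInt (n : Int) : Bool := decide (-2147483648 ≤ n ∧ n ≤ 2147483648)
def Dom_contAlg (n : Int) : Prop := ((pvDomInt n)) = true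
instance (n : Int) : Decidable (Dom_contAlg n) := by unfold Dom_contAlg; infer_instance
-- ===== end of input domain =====

-- B replaces A's non-tail recursion by an iterative loop with an explicit counter; same O(log n) cost.

-- ===== PORT A =====
def contAlg (n : Int) : Int :=
  if n < 10 then
    if n = 3 ∨ n = 4 then 1 else 0
  else
    if PySem.Int.mod n 10 = 3 ∨ PySem.Int.mod n 10 = 4 then
      1 + contAlg (PySem.Int.floordiv n 10)
    else
      contAlg (PySem.Int.floordiv n 10)
termination_by n.toNat
decreasing_by
  all_goals
    have h10 : PySem.Int.floordiv n 10 = n / 10 :=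
      PySem.Int.floordiv_eq_ediv_of_pos (by omega)
    rw [h10]; omega

-- ===== PORT B =====
-- the while loop of Source B: returns the final (n, count) state
def contAlgLoop (n count : Int) : Int × Int :=
  if 10 ≤ n then
    contAlgLoop (PySem.Int.floordiv n 10)
      (if PySem.Int.mod n 10 = 3 ∨ PySem.Int.mod n 10 = 4 then count + 1 else count)
  else (n, count)
termination_by n.toNat
decreasing_by
  have h10 : PySem.Int.floordiv n 10 = n / 10 :=
    PySem.Int.floordiv_eq_ediv_of_pos (by omega)
  rw [h10]; omega

def contAlg_alt (n : Int) : Int :=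
  let p := contAlgLoop n 0
  if p.1 = 3 ∨ p.1 = 4 then p.2 + 1 else p.2

-- ===== PRECONDITION & SPEC =====
def Spec_contAlg (n : Int) (out : Int) : Prop := out = contAlg_alt n
instance (n : Int) (out : Int) : Decidable (Spec_contAlg n out) := by unfold Spec_contAlg; infer_instance

-- ===== CLAIM (what is proved, stated in full; the proofs are below) =====
def Claim_equal_contAlg : Prop := ∀ (n : Int), Dom_contAlg n → Spec_contAlg n (contAlg n)

-- ===== LEMMAS AND PROOFS =====
-- the post-loop single-digit check applied to a loop state
def contAlgFin (p : Int × Int) : Int := if p.1 = 3 ∨ p.1 = 4 then p.2 + 1 else p.2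

theorem contAlgLoop_eq (k : Nat) : ∀ (n c : Int), n.toNat ≤ k →
    contAlgFin (contAlgLoop n c) = c + contAlg n := by
  induction k with
  | zero =>
    intro n c h
    have hn : n < 10 := by omega
    rw [contAlgLoop, contAlg, if_neg (by omega), if_pos hn]
    unfold contAlgFin
    split <;> simp
  | succ k ih =>
    intro n c h
    by_cases hn : 10 ≤ n
    · have h10 : PySem.Int.floordiv n 10 = n / 10 :=
        PySem.Int.floordiv_eq_ediv_of_pos (by omega)
      have hn' : ¬ n < 10 := by omega
      have hb : (PySem.Int.floordiv n 10).toNat ≤ k := by rw [h10]; omega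
      rw [contAlgLoop, if_pos hn, contAlg, if_neg hn']
      by_cases hc : PySem.Int.mod n 10 = 3 ∨ PySem.Int.mod n 10 = 4
      · rw [if_pos hc, if_pos hc, ih _ _ hb]; ring
      · rw [if_neg hc, if_neg hc, ih _ _ hb]
    · rw [contAlgLoop, if_neg hn, contAlg, if_pos (by omega)]
      unfold contAlgFin
      split <;> simp

-- ===== VERDICT (by name: the statement is the Claim_ definition above) =====
theorem contAlg_spec : Claim_equal_contAlg := by
  intro n _
  unfold Spec_contAlg contAlg_alt
  have h := contAlgLoop_eq n.toNat n 0 (le_refl _)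
  unfold contAlgFin at h
  simpa using h.symm
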